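-- pv_equiv track=rewrite | github.com/julianamilson/Mathler | src/mathler.py | isSignConsistent
-- ===== SOURCE A (Python) =====
-- def isSign(character):
-- 	list_of_Sign = "-+/*"
--
-- 	if (character == None or character == ""):
-- 		return False
-- 	for i in list_of_Sign:
-- 		if character == i:
-- 			return True
-- 	return False
--
-- def isSignConsistent(guess):
-- 	prev = 0
--
-- 	if (guess == None or guess == ""):
-- 		return False
-- 	if (guess[0] == "/" or guess[0] == "*"):
-- 		return False
-- 	if isSign(guess[len(guess) - 1]):
-- 		return False
-- 	for element in guess:
-- 		if isSign(element) == True and prev == 1: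
-- 			return False
-- 		if prev == 1 and isSign(element) == False:
-- 			prev = 0
-- 		if isSign(element) == True:
-- 			prev = 1
-- 	return True
-- ===== SOURCE B (Python) =====
-- def isSignConsistent(guess):
--     # staged approach: collect the indices of sign characters once,
--     # then judge placement arithmetically from the index list
--     if guess is None or guess == "":
--         return False
--     if guess[0] == "/" or guess[0] == "*":
--         return False
--     pos = [i for i, c in enumerate(guess) if c in "-+/*"]
--     if not pos:
--         return True
--     return pos[-1] != len(guess) - 1 and all(b - a >= 2 for a, b in zip(pos, pos[1:]))
-- ===== Notes on version B (the rewrite author's own statement) =====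
-- stated objective: alternative
-- what changed: Replaced A's single-pass state machine (prev flag updated per character, per-char calls to the isSign helper) by a staged computation: first collect the list of sign indices with one comprehension, then judge validity arithmetically on that index list (last index != len-1, all consecutive index gaps >= 2).
import Mathlib
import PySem

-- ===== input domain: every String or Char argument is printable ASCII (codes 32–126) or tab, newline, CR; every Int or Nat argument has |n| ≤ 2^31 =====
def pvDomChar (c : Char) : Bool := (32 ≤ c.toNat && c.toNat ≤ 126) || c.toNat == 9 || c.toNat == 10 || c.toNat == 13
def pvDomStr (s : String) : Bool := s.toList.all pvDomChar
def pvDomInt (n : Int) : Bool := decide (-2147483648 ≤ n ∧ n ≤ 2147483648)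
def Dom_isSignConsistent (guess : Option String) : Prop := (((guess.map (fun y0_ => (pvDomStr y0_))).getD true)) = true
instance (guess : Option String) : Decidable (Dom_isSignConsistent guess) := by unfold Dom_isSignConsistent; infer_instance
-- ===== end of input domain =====

-- B replaces A's per-character state machine by a staged computation over the list of sign indices (alternative decomposition).

-- ===== PORT A =====
-- isSign: loop over "-+/*" with early return True on match (the None/"" guard can never fire for a Char)
def pyIsSign (c : Char) : Bool := ['-', '+', '/', '*'].any (fun i => c == i)

-- the for-loop of A, with the mutable `prev` as an accumulator
def loopA : List Char → Nat → Bool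
  | [], _ => true
  | e :: rest, prev =>
    if pyIsSign e == true && prev == 1 then false
    else
      let prev1 := if prev == 1 && pyIsSign e == false then 0 else prev
      let prev2 := if pyIsSign e == true then 1 else prev1
      loopA rest prev2

def coreA : List Char → Bool
  | [] => false                                         -- guess == ""
  | c0 :: rest =>
    if c0 == '/' || c0 == '*' then false                -- guess[0] guard
    else if pyIsSign (List.getLast (c0 :: rest) (by simp)) then false   -- guess[len(guess)-1] guard
    else loopA (c0 :: rest) 0

def isSignConsistent (guess : Option String) : Bool :=
  match guess with
  | none => false                                       -- guess == None
  | some s => coreA s.toList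

-- ===== PORT B =====
def isSignB (c : Char) : Bool := ("-+/*".toList).contains c    -- `c in "-+/*"`

-- [i for i, c in enumerate(guess) if c in "-+/*"]: one recursion carrying the enumerate index
def signPositions : Nat → List Char → List Nat
  | _, [] => []
  | k, c :: t => if isSignB c then k :: signPositions (k + 1) t else signPositions (k + 1) t

def coreB (cs : List Char) : Bool :=
  match cs with
  | [] => false                                         -- guess == ""
  | c0 :: rest =>
    if c0 == '/' || c0 == '*' then false
    else
      match signPositions 0 (c0 :: rest) with
      | [] => true                                      -- no signs at all
      | p :: ps =>
        -- pos[-1] != len(guess) - 1 and all(b - a >= 2 for a, b in zip(pos, pos[1:]))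
        decide ((p :: ps).getLast (by simp) ≠ (c0 :: rest).length - 1) &&
        ((p :: ps).zip ps).all (fun q => q.1 + 2 ≤ q.2)

def isSignConsistent_alt (guess : Option String) : Bool :=
  match guess with
  | none => false
  | some s => coreB s.toList

-- ===== PRECONDITION & SPEC =====
def Spec_isSignConsistent (guess : Option String) (out : Bool) : Prop := out = isSignConsistent_alt guess
instance (guess : Option String) (out : Bool) : Decidable (Spec_isSignConsistent guess out) := by unfold Spec_isSignConsistent; infer_instance

-- ===== CLAIM (what is proved, stated in full; the proofs are below) =====
def Claim_equal_isSignConsistent : Prop := ∀ (guess : Option String), Dom_isSignConsistent guess → Spec_isSignConsistent guess (isSignConsistent guess)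

-- ===== LEMMAS AND PROOFS =====

theorem sign_eq (c : Char) : pyIsSign c = isSignB c := by
  have h : ("-+/*".toList) = ['-', '+', '/', '*'] := by decide
  simp [pyIsSign, isSignB, h]
  rfl

-- whether A's `prev` flag would be 1 entering the list (sign-ness of the head)
def headSign : List Char → Bool
  | [] => false
  | c :: _ => isSignB c

def adjAll (cs : List Char) : Bool := (cs.zip cs.tail).all (fun p => !(isSignB p.1 && isSignB p.2))

theorem adjAll_cons (e : Char) (rest : List Char) :
    adjAll (e :: rest) = (!(isSignB e && headSign rest) && adjAll rest) := by
  cases rest with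
  | nil => simp [adjAll, headSign]
  | cons r rs => simp [adjAll, headSign, List.zip]

theorem loopA_eq (cs : List Char) : ∀ (b : Bool),
    loopA cs (cond b 1 0) = (!(b && headSign cs) && adjAll cs) := by
  induction cs with
  | nil => intro b; simp [loopA, adjAll, headSign]
  | cons e rest ih =>
    intro b
    rw [adjAll_cons]
    have h2 : loopA (e :: rest) (cond b 1 0) =
        if pyIsSign e == true && (cond b 1 0) == 1 then false
        else loopA rest (cond (pyIsSign e) 1 0) := by
      cases b <;> cases h : pyIsSign e <;> simp [loopA, h]
    rw [h2]
    cases b <;> cases h : pyIsSign e <;>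
      simp_all [headSign, ← sign_eq]

-- recursive form of B's gap test, for the induction
def gapsOK : List Nat → Bool
  | [] => true
  | [_] => true
  | a :: b :: t => (a + 2 ≤ b) && gapsOK (b :: t)

theorem zipAll_eq_gapsOK (pos : List Nat) :
    (pos.zip pos.tail).all (fun q => q.1 + 2 ≤ q.2) = gapsOK pos := by
  induction pos with
  | nil => rfl
  | cons a t ih =>
    cases t with
    | nil => rfl
    | cons b u => simp [gapsOK, List.zip, ← ih]

theorem head_ge (cs : List Char) : ∀ (k m : Nat), (signPositions k cs).head? = some m → k ≤ m := by
  induction cs with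
  | nil => intro k m h; simp [signPositions] at h
  | cons c t ih =>
    intro k m h
    by_cases hc : isSignB c = true
    · simp [signPositions, hc] at h; omega
    · simp [signPositions, hc] at h
      have := ih (k + 1) m h; omega

theorem empty_no_signs (cs : List Char) : ∀ (k : Nat), signPositions k cs = [] → adjAll cs = true := by
  induction cs with
  | nil => intro _ _; rfl
  | cons c t ih =>
    intro k h
    by_cases hc : isSignB c = true
    · simp [signPositions, hc] at h
    · simp [signPositions, hc] at h
      have hc' : isSignB c = false := by simpa using hc
      rw [adjAll_cons, hc']
      simp [ih (k + 1) h]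

theorem gaps_main (cs : List Char) : ∀ (k : Nat), gapsOK (signPositions k cs) = adjAll cs := by
  induction cs with
  | nil => intro _; rfl
  | cons c t ih =>
    intro k
    by_cases hc : isSignB c = true
    · have hsp : signPositions k (c :: t) = k :: signPositions (k + 1) t := by
        simp [signPositions, hc]
      rw [hsp, adjAll_cons, hc]
      cases ht : signPositions (k + 1) t with
      | nil =>
        have hadj := empty_no_signs t (k + 1) ht
        have hhs : headSign t = false := by
          cases t with
          | nil => rfl
          | cons d u =>
            by_cases hd : isSignB d = true
            · simp [signPositions, hd] at ht
            · simp [headSign]; simpa using hd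
        simp [gapsOK, hhs, hadj]
      | cons m ms =>
        have hih := ih (k + 1)
        rw [ht] at hih
        cases t with
        | nil => simp [signPositions] at ht
        | cons d u =>
          by_cases hd : isSignB d = true
          · have hm : m = k + 1 := by
              simp [signPositions, hd] at ht
              omega
            have hfail : ¬ (k + 2 ≤ m) := by omega
            simp [gapsOK, headSign, hd, hfail]
          · have hm2 : k + 2 ≤ m := by
              have h1 : signPositions (k + 1) (d :: u) = signPositions (k + 1 + 1) u := by
                simp [signPositions, hd]
              rw [h1] at ht
              have := head_ge u (k + 1 + 1) m (by rw [ht]; rfl)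
              omega
            have hd' : isSignB d = false := by simpa using hd
            simp [gapsOK, headSign, hd', hm2, hih]
    · have hsp : signPositions k (c :: t) = signPositions (k + 1) t := by
        simp [signPositions, hc]
      rw [hsp, adjAll_cons, ih (k + 1)]
      have hc' : isSignB c = false := by simpa using hc
      simp [hc']

theorem last_sign (cs : List Char) : ∀ (k : Nat) (h : cs ≠ []),
    isSignB (cs.getLast h) = true →
    (signPositions k cs).getLast? = some (k + cs.length - 1) := by
  induction cs with
  | nil => intro _ h; exact absurd rfl h
  | cons c t ih =>
    intro k h hs
    cases t with
    | nil =>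
      simp [List.getLast] at hs
      simp [signPositions, hs]
    | cons d u =>
      have hlast : (c :: d :: u).getLast h = (d :: u).getLast (by simp) := by
        simp [List.getLast]
      rw [hlast] at hs
      have htail := ih (k + 1) (by simp) hs
      by_cases hc : isSignB c = true
      · cases hq : signPositions (k + 1) (d :: u) with
        | nil => rw [hq] at htail; simp at htail
        | cons q qs =>
          rw [hq] at htail
          have hsp : signPositions k (c :: d :: u) = k :: signPositions (k + 1) (d :: u) := by
            simp [signPositions, hc]
          rw [hsp, hq, List.getLast?_cons_cons, htail]
          congr 1
          simp only [List.length_cons]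
          omega
      · have hsp : signPositions k (c :: d :: u) = signPositions (k + 1) (d :: u) := by
          simp [signPositions, hc]
        rw [hsp, htail]
        congr 1
        simp only [List.length_cons]
        omega

theorem last_not_sign (cs : List Char) : ∀ (k m : Nat) (h : cs ≠ []),
    isSignB (cs.getLast h) = false → m ∈ signPositions k cs → m < k + cs.length - 1 := by
  induction cs with
  | nil => intro _ _ h; exact absurd rfl h
  | cons c t ih =>
    intro k m h hs hm
    cases t with
    | nil =>
      simp [List.getLast] at hs
      simp [signPositions, hs] at hm
    | cons d u =>
      have hlast : (c :: d :: u).getLast h = (d :: u).getLast (by simp) := by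
        simp [List.getLast]
      rw [hlast] at hs
      by_cases hc : isSignB c = true
      · simp [signPositions, hc] at hm
        rcases hm with hm | hm
        · simp only [List.length_cons]; omega
        · have := ih (k + 1) m (by simp) hs hm
          simp only [List.length_cons] at *
          omega
      · simp [signPositions, hc] at hm
        have := ih (k + 1) m (by simp) hs hm
        simp only [List.length_cons] at *
        omega

theorem core_eq (cs : List Char) : coreA cs = coreB cs := by
  cases cs with
  | nil => rfl
  | cons c0 rest =>
    by_cases h1 : (c0 == '/' || c0 == '*') = true
    · simp [coreA, coreB, h1]
    · have h3 := loopA_eq (c0 :: rest) false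
      simp at h3
      have hA0 : coreA (c0 :: rest) =
          (if isSignB ((c0 :: rest).getLast (by simp)) = true then false
           else adjAll (c0 :: rest)) := by
        simp [coreA, h1, sign_eq, h3]
      rw [hA0]
      cases hpos : signPositions 0 (c0 :: rest) with
      | nil =>
        have h2 : isSignB ((c0 :: rest).getLast (by simp)) = false := by
          by_contra hcon
          have hs : isSignB ((c0 :: rest).getLast (by simp)) = true := by simpa using hcon
          have := last_sign (c0 :: rest) 0 (by simp) hs
          rw [hpos] at this; simp at this
        simp [coreB, h1, hpos, h2, empty_no_signs (c0 :: rest) 0 hpos]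
      | cons p ps =>
        by_cases h2 : isSignB ((c0 :: rest).getLast (by simp)) = true
        · have hl := last_sign (c0 :: rest) 0 (by simp) h2
          rw [hpos] at hl
          have hlast : (p :: ps).getLast (by simp) = rest.length := by
            rw [List.getLast?_eq_some_getLast (l := p :: ps) (by simp)] at hl
            simpa using hl
          simp [coreB, h1, hpos, h2, hlast]
        · have h2' : isSignB ((c0 :: rest).getLast (by simp)) = false := by simpa using h2
          have hmem : (p :: ps).getLast (by simp) ∈ signPositions 0 (c0 :: rest) := by
            rw [hpos]; exact List.getLast_mem (by simp)
          have hlt := last_not_sign (c0 :: rest) 0 ((p :: ps).getLast (by simp)) (by simp) h2' hmem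
          have hne : (p :: ps).getLast (by simp) ≠ rest.length := by
            have hlen : (c0 :: rest).length = rest.length + 1 := List.length_cons
            omega
          have hz := zipAll_eq_gapsOK (p :: ps)
          simp only [List.tail_cons] at hz
          have hg := gaps_main (c0 :: rest) 0
          rw [hpos] at hg
          simp [coreB, h1, hpos, h2', hne, hz, hg]

-- ===== VERDICT (by name: the statement is the Claim_ definition above) =====
theorem isSignConsistent_spec : Claim_equal_isSignConsistent := by
  intro guess _
  unfold Spec_isSignConsistent isSignConsistent isSignConsistent_alt
  cases guess with
  | none => rfl
  | some s => exact core_eq s.toList
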